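-- pv_equiv track=rewrite | github.com/vsuminv/Algorithm | 프로그래머스/2/12914. 멀리 뛰기/멀리 뛰기.py | solution
-- ===== SOURCE A (Python) =====
-- def solution(n):
--     answer = 0
--     a = [0]*(n+1)
--     a[0] = 1
--     a[1] = 2
--
--
--     for i in range(2,n+1):
--         a[i] = a[i-1] + a[i-2]
--
--
--     answer = a[n-1] % 1234567
--
--
--
--     return answer
-- ===== SOURCE B (Python) =====
-- def solution(n):
--     M = 1234567
--
--     def fd(k):
--         # (F(k) % M, F(k+1) % M) with F(0)=0, F(1)=1, by fast doubling
--         if k == 0: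
--             return (0, 1)
--         a, b = fd(k // 2)
--         c = a * ((2 * b - a) % M) % M
--         d = (a * a + b * b) % M
--         if k % 2:
--             return (d, (c + d) % M)
--         return (c, d)
--
--     return fd(n + 1)[0]
-- ===== Notes on version B (the rewrite author's own statement) =====
-- stated objective: faster
-- what changed: A fills an O(n) DP table a[i]=a[i-1]+a[i-2] and takes a[n-1] mod 1234567; B computes the same Fibonacci value with fast doubling (F(2k), F(2k+1) from F(k), F(k+1)) reducing everything mod 1234567 at each step.
import Mathlib
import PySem

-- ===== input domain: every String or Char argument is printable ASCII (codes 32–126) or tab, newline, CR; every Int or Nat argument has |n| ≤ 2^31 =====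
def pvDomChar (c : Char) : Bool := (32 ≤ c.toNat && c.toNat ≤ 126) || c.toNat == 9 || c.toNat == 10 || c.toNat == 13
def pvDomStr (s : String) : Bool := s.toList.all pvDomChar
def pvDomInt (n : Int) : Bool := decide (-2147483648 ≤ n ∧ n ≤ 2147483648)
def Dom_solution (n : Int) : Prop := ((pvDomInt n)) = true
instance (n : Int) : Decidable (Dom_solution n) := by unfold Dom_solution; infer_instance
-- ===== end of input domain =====

-- B replaces A's linear table fill with fast doubling on Fibonacci pairs mod 1234567 (asymptotically faster).

-- ===== PORT A =====
def solution (n : Int) : Int :=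
  let a : List Int := List.replicate (n + 1).toNat 0
  let a := PySem.List.pySetD a 0 1
  let a := PySem.List.pySetD a 1 2
  let a := (PySem.List.pyRange 2 (n + 1) 1).foldl
    (fun a i =>
      PySem.List.pySetD a i (PySem.List.pyGetD a (i - 1) 0 + PySem.List.pyGetD a (i - 2) 0)) a
  PySem.Int.mod (PySem.List.pyGetD a (n - 1) 0) 1234567

-- ===== PORT B =====
-- fd k = (F(k) % M, F(k+1) % M) with F(0)=0, F(1)=1, by fast doubling (Source B's fd)
def fd : Nat → Int × Int
  | 0 => (0, 1)
  | (k + 1) =>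
    let p := fd ((k + 1) / 2)
    let a := p.1
    let b := p.2
    let c := PySem.Int.mod (a * PySem.Int.mod (2 * b - a) 1234567) 1234567
    let d := PySem.Int.mod (a * a + b * b) 1234567
    if (k + 1) % 2 = 1 then (d, PySem.Int.mod (c + d) 1234567) else (c, d)
decreasing_by exact Nat.div_lt_self (Nat.succ_pos k) one_lt_two

def solution_alt (n : Int) : Int := (fd (n + 1).toNat).1

-- ===== PRECONDITION & SPEC =====
-- Python A raises IndexError for every n ≤ 0 (the table it allocates has no cell 1, or is empty), so those inputs are excluded.
def Pre_solution (n : Int) : Prop := 1 ≤ n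
instance (n : Int) : Decidable (Pre_solution n) := by unfold Pre_solution; infer_instance
def pvWitness_solution : Int := 5

def Spec_solution (n : Int) (out : Int) : Prop := out = solution_alt n
instance (n : Int) (out : Int) : Decidable (Spec_solution n out) := by unfold Spec_solution; infer_instance

-- ===== CLAIM (what is proved, stated in full; the proofs are below) =====
def Claim_equal_solution : Prop := ∀ (n : Int), Dom_solution n → Pre_solution n → Spec_solution n (solution n)

-- ===== LEMMAS AND PROOFS =====

theorem modmul (a b M : Int) : ((a % M) * ((2*(b % M) - a % M) % M)) % M = (a*(2*b - a)) % M := by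
  conv_rhs => rw [Int.mul_emod, Int.sub_emod, Int.mul_emod, Int.emod_emod_of_dvd _ dvd_rfl]
  simp [Int.mul_emod, Int.sub_emod]

theorem modsq (a b M : Int) : ((a % M) * (a % M) + (b % M) * (b % M)) % M = (a*a + b*b) % M := by
  conv_rhs => rw [Int.add_emod, Int.mul_emod, Int.mul_emod]
  simp [Int.add_emod, Int.mul_emod]

theorem fibInt_two_mul (m : Nat) : (Nat.fib (2*m) : Int) = (Nat.fib m : Int) * (2 * (Nat.fib (m+1) : Int) - Nat.fib m) := by
  have h1 : Nat.fib m ≤ Nat.fib (m+1) := Nat.fib_mono (Nat.le_succ m)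
  have hle : Nat.fib m ≤ 2 * Nat.fib (m+1) := by omega
  rw [Nat.fib_two_mul m]
  push_cast [Nat.cast_sub hle]
  ring

theorem fibInt_two_mul_add_one (m : Nat) : (Nat.fib (2*m+1) : Int) = (Nat.fib m : Int) * Nat.fib m + (Nat.fib (m+1) : Int) * Nat.fib (m+1) := by
  rw [Nat.fib_two_mul_add_one m]; push_cast; ring

theorem fd_fib : ∀ k : Nat, fd k = ((Nat.fib k : Int) % 1234567, (Nat.fib (k + 1) : Int) % 1234567) := by
  intro k
  induction k using Nat.strong_induction_on with
  | _ k ih =>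
    match k with
    | 0 => simp [fd]
    | Nat.succ k =>
      have hm : (k+1)/2 < k+1 := Nat.div_lt_self (Nat.succ_pos k) one_lt_two
      have hp := ih _ hm
      rw [fd, hp]
      simp only [PySem.Int.mod_eq_emod_of_pos (by norm_num : (0:Int) < 1234567)]
      set m := (k+1)/2 with hmdef
      by_cases hpar : (k + 1) % 2 = 1
      · have hk : k + 1 = 2*m + 1 := by omega
        simp only [hpar]
        rw [modmul, modsq, ← fibInt_two_mul, ← fibInt_two_mul_add_one]
        rw [Int.add_emod_emod, Int.emod_add_emod]
        simp only [Nat.succ_eq_add_one, hk, if_true]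
        refine Prod.ext rfl ?_
        have h2 : Nat.fib (2*m + 1 + 1) = Nat.fib (2*m) + Nat.fib (2*m + 1) := Nat.fib_add_two
        rw [h2]
        push_cast
        rfl
      · have hk : k + 1 = 2*m := by omega
        simp only [hpar]
        rw [modmul, modsq, ← fibInt_two_mul, ← fibInt_two_mul_add_one]
        simp only [Nat.succ_eq_add_one, hk, if_false]

-- Nat-level reformulation of A's loop body and initial table
def nstep (a : List Int) (k : Nat) : List Int :=
  a.set (k + 2) (a.getD (k + 1) 0 + a.getD k 0)

def initA (N : Nat) : List Int := ((List.replicate (N + 1) (0 : Int)).set 0 1).set 1 2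

theorem step_eq_nstep (a : List Int) (k : Nat) :
    PySem.List.pySetD a (2 + (k : Int))
      (PySem.List.pyGetD a (2 + (k : Int) - 1) 0 + PySem.List.pyGetD a (2 + (k : Int) - 2) 0)
    = nstep a k := by
  have h1 : (2 + (k : Int)) = ((k + 2 : Nat) : Int) := by push_cast; ring
  have h2 : (2 + (k : Int) - 1) = ((k + 1 : Nat) : Int) := by push_cast; ring
  have h3 : (2 + (k : Int) - 2) = ((k : Nat) : Int) := by omega
  rw [h2, h3, h1, PySem.List.pySetD_natCast, PySem.List.pyGetD_natCast, PySem.List.pyGetD_natCast]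
  rfl

theorem loop_inv (N : Nat) (hN : 1 ≤ N) :
    ∀ t : Nat, 2 + t ≤ N + 1 →
      ((List.range t).foldl nstep (initA N)).length = N + 1 ∧
      ∀ j : Nat, j < 2 + t →
        ((List.range t).foldl nstep (initA N)).getD j 0 = (Nat.fib (j + 2) : Int) := by
  intro t
  induction t with
  | zero =>
    intro _
    obtain ⟨N', rfl⟩ : ∃ N', N = N' + 1 := ⟨N - 1, by omega⟩
    have hinit : initA (N' + 1) = 1 :: 2 :: List.replicate N' (0 : Int) := by
      simp [initA, List.replicate_succ]
    constructor
    · simp [hinit]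
    · intro j hj
      interval_cases j
      · simp [hinit]
      · simp [hinit, (by decide : Nat.fib 3 = 2)]
  | succ t ih =>
    intro ht
    have ht' : 2 + t ≤ N + 1 := by omega
    obtain ⟨hlen, hval⟩ := ih ht'
    rw [List.range_succ, List.foldl_append, List.foldl_cons, List.foldl_nil]
    set l := (List.range t).foldl nstep (initA N) with hl
    have hlt : t + 2 < l.length := by omega
    constructor
    · simp [nstep, List.length_set, hlen]
    · intro j hj
      unfold nstep
      by_cases hje : j = t + 2
      · subst hje
        rw [List.getD_eq_getElem?_getD, List.getElem?_set_self hlt]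
        have e1 := hval (t + 1) (by omega)
        have e2 := hval t (by omega)
        rw [List.getD_eq_getElem?_getD] at e1 e2
        simp only [Option.getD_some]
        rw [List.getD_eq_getElem?_getD, List.getD_eq_getElem?_getD, e1, e2]
        have hf : Nat.fib (t + 2 + 2) = Nat.fib (t + 2) + Nat.fib (t + 2 + 1) := Nat.fib_add_two
        rw [hf]
        push_cast
        ring
      · rw [List.getD_eq_getElem?_getD, List.getElem?_set_ne (by omega)]
        have := hval j (by omega)
        rw [List.getD_eq_getElem?_getD] at this
        exact this

theorem solution_eq_fib (N : Nat) (hN : 1 ≤ N) :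
    solution (N : Int) = (Nat.fib (N + 1) : Int) % 1234567 := by
  have h1 : ((N : Int) + 1).toNat = N + 1 := by omega
  have h2 : PySem.List.pyRange 2 ((N : Int) + 1) 1
      = (List.range (N - 1)).map (fun k : Nat => (2 : Int) + (k : Int)) := by
    rw [PySem.List.pyRange_one,
      show (((N : Int) + 1) - 2).toNat = N - 1 by omega]
  have h0 : PySem.List.pySetD (PySem.List.pySetD (List.replicate (N + 1) (0 : Int)) 0 1) 1 2
      = initA N := by
    simp [PySem.List.pySetD_of_nonneg, initA]
  have h3 : ((N : Int) - 1) = ((N - 1 : Nat) : Int) := by omega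
  unfold solution
  simp only [h1, h2, h0, List.foldl_map, step_eq_nstep, h3, PySem.List.pyGetD_natCast]
  have hv := (loop_inv N hN (N - 1) (by omega)).2 (N - 1) (by omega)
  rw [show N - 1 + 2 = N + 1 by omega] at hv
  rw [hv, PySem.Int.mod_eq_emod_of_pos (by norm_num : (0:Int) < 1234567)]

-- ===== VERDICT (by name: the statement is the Claim_ definition above) =====
theorem solution_spec : Claim_equal_solution := by
  intro n _ hpre
  have hpre' : 1 ≤ n := hpre
  obtain ⟨N, rfl⟩ : ∃ N : Nat, n = (N : Int) := ⟨n.toNat, (Int.toNat_of_nonneg (by omega)).symm⟩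
  have hN : 1 ≤ N := by exact_mod_cast hpre'
  show solution (N : Int) = solution_alt (N : Int)
  rw [solution_eq_fib N hN]
  unfold solution_alt
  have h1 : ((N : Int) + 1).toNat = N + 1 := by omega
  rw [h1, fd_fib]
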